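-- pv_equiv track=rewrite | github.com/ZakLawrence/Advent-Of-Code-2024 | Day7/day7.py | can_form_result_concatination
-- ===== SOURCE A (Python) =====
-- def can_form_result_concatination(result,current,numbers):
--     if current > result:
--         return False
--     elif len(numbers) == 0:
--         return result == current
--     else:
--         head, *tail = numbers
--         mul_value = current * head
--         add_value = current + head
--         merge_value = int(''.join([str(current),str(head)]))
--         return can_form_result_concatination(result,mul_value,tail) or can_form_result_concatination(result,add_value,tail) or can_form_result_concatination(result,merge_value,tail)
-- ===== SOURCE B (Python) =====
-- def can_form_result_concatination(result, current, numbers):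
--     # Iterative forward reachability sweep instead of recursive DFS.
--     if current > result:
--         return False
--     reachable = {current}
--     for head in numbers:
--         nxt = set()
--         for v in reachable:
--             # concat computed for every surviving v, like A's eager merge_value
--             for c in (v * head, v + head, int(str(v) + str(head))):
--                 if c <= result:
--                     nxt.add(c)
--         reachable = nxt
--     return result in reachable
-- ===== Notes on version B (the rewrite author's own statement) =====
-- stated objective: alternative
-- what changed: Recursive three-way DFS with per-call pruning is replaced by an iterative breadth-first reachability sweep that maintains the set of reachable partial values (all kept <= result) and checks membership of result at the end.
-- outside the precondition, e.g. on can_form_result_concatination(10, 5, [100, -1]): A returns False, B returns False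
import Mathlib
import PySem

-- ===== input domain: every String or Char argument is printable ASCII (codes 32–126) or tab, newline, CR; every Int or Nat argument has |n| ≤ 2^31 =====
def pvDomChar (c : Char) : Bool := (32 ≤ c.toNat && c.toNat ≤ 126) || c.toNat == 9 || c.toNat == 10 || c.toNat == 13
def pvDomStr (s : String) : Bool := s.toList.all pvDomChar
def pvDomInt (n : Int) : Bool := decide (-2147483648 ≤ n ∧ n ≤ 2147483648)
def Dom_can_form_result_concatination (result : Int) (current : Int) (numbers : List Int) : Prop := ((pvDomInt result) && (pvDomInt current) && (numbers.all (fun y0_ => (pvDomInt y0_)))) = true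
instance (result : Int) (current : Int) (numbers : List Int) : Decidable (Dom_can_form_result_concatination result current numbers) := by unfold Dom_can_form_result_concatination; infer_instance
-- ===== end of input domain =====

-- B replaces A's recursive three-way DFS by an iterative reachable-set sweep over the numbers (alternative decomposition, same results).


-- int(str(v) + str(h)) — shared primitive of both ports; exact via PySem.Int.toChars/ofChars?.
-- Python raises ValueError exactly where ofChars? is none (h < 0); Pre_ excludes those inputs, .getD 0 is unreachable there.
def pvMerge (v h : Int) : Int :=
  (PySem.Int.ofChars? (PySem.Int.toChars v ++ PySem.Int.toChars h)).getD 0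

-- ===== PORT A =====
def can_form_result_concatination (result : Int) (current : Int) (numbers : List Int) : Bool :=
  if current > result then false
  else
    match numbers with
    | [] => result == current
    | head :: tail =>
      let mul_value := current * head
      let add_value := current + head
      let merge_value := pvMerge current head
      can_form_result_concatination result mul_value tail ||
      can_form_result_concatination result add_value tail ||
      can_form_result_concatination result merge_value tail

-- ===== PORT B =====
-- one sweep step: from the set of reachable values, apply the three operators with head and keep values ≤ result
def pvStep (result : Int) (reachable : PySem.Set Int) (head : Int) : PySem.Set Int :=
  reachable.foldl
    (fun nxt v =>
      [v * head, v + head, pvMerge v head].foldl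
        (fun nxt c => if c ≤ result then PySem.Set.add nxt c else nxt) nxt)
    PySem.Set.empty

def can_form_result_concatination_alt (result : Int) (current : Int) (numbers : List Int) : Bool :=
  if current > result then false
  else
    let reachable := numbers.foldl (pvStep result) (PySem.Set.add PySem.Set.empty current)
    PySem.Set.contains reachable result

-- ===== PRECONDITION & SPEC =====
-- Pre_ excludes inputs on which Python A raises ValueError (a negative number reached by a live branch makes
-- int(str(current)+str(head)) fail); as a closed form it is slightly narrower: it also excludes some inputs with a
-- negative number that pruning keeps A from reaching, on which A and B both return False (see cites).
def Pre_can_form_result_concatination (result : Int) (current : Int) (numbers : List Int) : Prop :=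
  result < current ∨ ∀ n ∈ numbers, 0 ≤ n
instance (result : Int) (current : Int) (numbers : List Int) : Decidable (Pre_can_form_result_concatination result current numbers) := by unfold Pre_can_form_result_concatination; infer_instance
def pvWitness_can_form_result_concatination : Int × Int × List Int := (190, 1, [9, 10, 19])

def Spec_can_form_result_concatination (result : Int) (current : Int) (numbers : List Int) (out : Bool) : Prop := out = can_form_result_concatination_alt result current numbers
instance (result : Int) (current : Int) (numbers : List Int) (out : Bool) : Decidable (Spec_can_form_result_concatination result current numbers out) := by unfold Spec_can_form_result_concatination; infer_instance

-- ===== CLAIM (what is proved, stated in full; the proofs are below) =====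
def Claim_equal_can_form_result_concatination : Prop := ∀ (result : Int) (current : Int) (numbers : List Int), Dom_can_form_result_concatination result current numbers → Pre_can_form_result_concatination result current numbers → Spec_can_form_result_concatination result current numbers (can_form_result_concatination result current numbers)

-- ===== LEMMAS AND PROOFS =====

-- A returns false as soon as the current value exceeds result
lemma A_false_of_gt (result w : Int) (numbers : List Int) (h : result < w) :
    can_form_result_concatination result w numbers = false := by
  cases numbers <;> simp [can_form_result_concatination, h]

-- membership in the inner candidate-filtering fold
lemma mem_condAdd (result w : Int) (cs : List Int) (acc : PySem.Set Int) :
    w ∈ cs.foldl (fun nxt c => if c ≤ result then PySem.Set.add nxt c else nxt) acc ↔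
      w ∈ acc ∨ (w ∈ cs ∧ w ≤ result) := by
  induction cs generalizing acc with
  | nil => simp
  | cons c cs ih =>
    rw [List.foldl_cons, ih]
    by_cases hc : c ≤ result
    · simp [hc, PySem.Set.mem_add]
      constructor
      · rintro ((h | rfl) | h) <;> tauto
      · rintro (h | ⟨(rfl | h), hle⟩) <;> tauto
    · simp [hc]
      constructor
      · rintro (h | h) <;> tauto
      · rintro (h | ⟨(rfl | h), hle⟩) <;> tauto

-- membership in one sweep step
lemma mem_pvStep (result head w : Int) (S : PySem.Set Int) :
    w ∈ pvStep result S head ↔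
      (∃ v ∈ S, w = v * head ∨ w = v + head ∨ w = pvMerge v head) ∧ w ≤ result := by
  unfold pvStep
  suffices h : ∀ (acc : PySem.Set Int),
      w ∈ S.foldl (fun nxt v => [v * head, v + head, pvMerge v head].foldl
          (fun nxt c => if c ≤ result then PySem.Set.add nxt c else nxt) nxt) acc ↔
        w ∈ acc ∨ ((∃ v ∈ S, w = v * head ∨ w = v + head ∨ w = pvMerge v head) ∧ w ≤ result) by
    simpa using h PySem.Set.empty
  induction S with
  | nil => simp
  | cons v S ih =>
    intro acc
    rw [List.foldl_cons, ih, mem_condAdd]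
    constructor
    · rintro ((h | ⟨hm, hle⟩) | ⟨⟨u, hu, hm⟩, hle⟩)
      · tauto
      · exact Or.inr ⟨⟨v, by simp, by simpa using hm⟩, hle⟩
      · exact Or.inr ⟨⟨u, by simp [hu], hm⟩, hle⟩
    · rintro (h | ⟨⟨u, hu, hm⟩, hle⟩)
      · tauto
      · rcases List.mem_cons.mp hu with rfl | hu
        · exact Or.inl (Or.inr ⟨by simpa using hm, hle⟩)
        · exact Or.inr ⟨⟨u, hu, hm⟩, hle⟩

-- the sweep invariant: result is reachable after the sweep iff A succeeds from some value in the frontier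
lemma sweep_iff (result : Int) (numbers : List Int) :
    ∀ (S : PySem.Set Int), (∀ v ∈ S, v ≤ result) →
      (result ∈ numbers.foldl (pvStep result) S ↔
        ∃ v ∈ S, can_form_result_concatination result v numbers = true) := by
  induction numbers with
  | nil =>
    intro S hS
    simp only [List.foldl_nil]
    constructor
    · intro h
      exact ⟨result, h, by simp [can_form_result_concatination]⟩
    · rintro ⟨v, hv, hA⟩
      simp [can_form_result_concatination, not_lt.mpr (hS _ hv)] at hA
      simpa [hA] using hv
  | cons head tail ih =>
    intro S hS
    simp only [List.foldl_cons]
    rw [ih (pvStep result S head) (fun w hw => ((mem_pvStep result head w S).mp hw).2)]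
    constructor
    · rintro ⟨w, hw, hA⟩
      rcases (mem_pvStep result head w S).mp hw with ⟨⟨v, hv, hm⟩, _⟩
      refine ⟨v, hv, ?_⟩
      simp only [can_form_result_concatination, if_neg (not_lt.mpr (hS _ hv)), Bool.or_eq_true]
      rcases hm with rfl | rfl | rfl <;> tauto
    · rintro ⟨v, hv, hA⟩
      simp only [can_form_result_concatination, if_neg (not_lt.mpr (hS _ hv)), Bool.or_eq_true] at hA
      have get : ∀ c : Int, can_form_result_concatination result c tail = true →
          (c = v * head ∨ c = v + head ∨ c = pvMerge v head) →
          ∃ w ∈ pvStep result S head, can_form_result_concatination result w tail = true := by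
        intro c hc hm
        by_cases hle : c ≤ result
        · exact ⟨c, (mem_pvStep result head c S).mpr ⟨⟨v, hv, hm⟩, hle⟩, hc⟩
        · rw [A_false_of_gt result c tail (lt_of_not_ge hle)] at hc; exact absurd hc (by simp)
      rcases hA with (h | h) | h
      · exact get _ h (by tauto)
      · exact get _ h (by tauto)
      · exact get _ h (by tauto)

lemma ports_agree (result current : Int) (numbers : List Int) :
    can_form_result_concatination result current numbers =
      can_form_result_concatination_alt result current numbers := by
  by_cases hc : current > result
  · rw [A_false_of_gt result current numbers hc]
    simp [can_form_result_concatination_alt, hc]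
  · unfold can_form_result_concatination_alt
    rw [if_neg hc]
    have h := sweep_iff result numbers (PySem.Set.add PySem.Set.empty current)
      (by intro v hv; simp [PySem.Set.add, PySem.Set.empty] at hv; omega)
    rw [Bool.eq_iff_iff, PySem.Set.contains_iff, h]
    simp [PySem.Set.add, PySem.Set.empty]

-- ===== VERDICT (by name: the statement is the Claim_ definition above) =====
theorem can_form_result_concatination_spec : Claim_equal_can_form_result_concatination := by
  intro result current numbers _ _
  unfold Spec_can_form_result_concatination
  exact ports_agree result current numbers
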